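-- pv_equiv track=rewrite | github.com/pypi-data/pypi-mirror-401 | packages/chunkana/chunkana-0.1.6.tar.gz/chunkana-0.1.6/src/chunkana/section_splitter.py | _extract_header_stack_and_body
-- ===== SOURCE A (Python) =====
-- def _extract_header_stack_and_body(content: str) -> tuple[str, str]:
--     """
--     Extract header_stack (all consecutive headers at start) and body.
--
--     Header_stack is the sequence of consecutive header lines at the
--     beginning of content (skipping empty lines between headers).
--
--     Example:
--         "## Impact\\n\\n#### Итоги работы\\n\\n1. First item..."
--         → header_stack = "## Impact\\n\\n#### Итоги работы"
--         → body = "1. First item..."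
--
--     Args:
--         content: Chunk content
--
--     Returns:
--         Tuple of (header_stack, body)
--     """
--     lines = content.split("\n")
--     header_lines: list[str] = []
--     body_start_idx = 0
--     in_header_section = True
--
--     for i, line in enumerate(lines):
--         stripped = line.strip()
--
--         if not stripped:
--             # Empty line - continue if we're still in header section
--             if in_header_section and header_lines:
--                 header_lines.append("")  # Preserve empty line between headers
--             continue
--
--         if stripped.startswith("#") and in_header_section:
--             header_lines.append(line)
--             body_start_idx = i + 1
--         else:
--             # First non-header, non-empty line - end of header section
--             in_header_section = False
--             body_start_idx = i
--             break
--
--     # Remove trailing empty lines from header_stack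
--     while header_lines and not header_lines[-1].strip():
--         header_lines.pop()
--
--     header_stack = "\n".join(header_lines) if header_lines else ""
--     body = "\n".join(lines[body_start_idx:]).strip()
--
--     return header_stack, body
-- ===== SOURCE B (Python) =====
-- def _extract_header_stack_and_body(content: str) -> tuple[str, str]:
--     lines = content.split("\n")
--     # phase 1: boundary = index of first non-empty, non-header line
--     boundary = len(lines)
--     for i, line in enumerate(lines):
--         s = line.strip()
--         if s and not s.startswith("#"):
--             boundary = i
--             break
--     # phase 2: header block = prefix with blank lines normalised, trimmed at both ends
--     hdr = [l if l.strip() else "" for l in lines[:boundary]]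
--     while hdr and hdr[0] == "":
--         hdr.pop(0)
--     while hdr and hdr[-1] == "":
--         hdr.pop()
--     return "\n".join(hdr), "\n".join(lines[boundary:]).strip()
-- ===== Notes on version B (the rewrite author's own statement) =====
-- stated objective: simpler
-- what changed: Replaces A's single stateful pass (in_header flag, accumulator with conditional blank insertion, body_start_idx bookkeeping, break, then a trailing pop loop) by a two-phase computation: find the boundary index of the first non-empty non-header line, then slice the prefix, normalise blank lines and trim it at both ends.
import Mathlib
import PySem

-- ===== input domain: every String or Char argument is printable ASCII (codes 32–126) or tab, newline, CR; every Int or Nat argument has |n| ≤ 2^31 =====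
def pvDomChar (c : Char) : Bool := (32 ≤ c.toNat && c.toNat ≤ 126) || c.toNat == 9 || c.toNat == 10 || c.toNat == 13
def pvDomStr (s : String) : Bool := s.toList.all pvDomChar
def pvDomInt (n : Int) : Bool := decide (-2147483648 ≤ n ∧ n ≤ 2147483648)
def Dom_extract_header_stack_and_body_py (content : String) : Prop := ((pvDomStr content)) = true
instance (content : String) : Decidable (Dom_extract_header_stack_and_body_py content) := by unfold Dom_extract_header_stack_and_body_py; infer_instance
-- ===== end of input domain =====

-- B replaces A's single pass (flag + accumulator + body-start index + break, then a trailing pop loop)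
-- by a two-phase computation: find the boundary index, then slice and trim; objective: simpler.

-- ===== PORT A =====
-- the for-loop of A: state (i, header_lines, body_start_idx, in_header_section); 'break' returns
def pvLoopA : List (List Char) → Nat → List (List Char) → Nat → Bool → (List (List Char) × Nat)
  | [], _, hdr, bsi, _ => (hdr, bsi)
  | l :: rest, i, hdr, bsi, inH =>
    let s := PySem.Chars.strip l
    if s.isEmpty then
      pvLoopA rest (i + 1) (if inH && !hdr.isEmpty then hdr ++ [[]] else hdr) bsi inH
    else if PySem.Chars.startswith s ['#'] && inH then
      pvLoopA rest (i + 1) (hdr ++ [l]) (i + 1) inH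
    else (hdr, i)

-- A's 'while header_lines and not header_lines[-1].strip(): pop()', done on the reversed list
def pvDropEmptyRevA : List (List Char) → List (List Char)
  | [] => []
  | l :: rest => if (PySem.Chars.strip l).isEmpty then pvDropEmptyRevA rest else l :: rest

def extract_header_stack_and_body_py (content : String) : String × String :=
  let lines := PySem.Chars.splitOn content.toList ['\n']
  let r := pvLoopA lines 0 [] 0 true
  let hdr2 := (pvDropEmptyRevA r.1.reverse).reverse
  let header_stack := if hdr2.isEmpty then [] else PySem.Chars.join ['\n'] hdr2
  let body := PySem.Chars.strip (PySem.Chars.join ['\n'] (PySem.List.slice lines (some (r.2 : Int)) none))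
  (String.ofList header_stack, String.ofList body)

-- ===== PORT B =====
-- B's boundary scan: index of the first non-empty non-'#' line, default len(lines)
def pvBoundaryB : List (List Char) → Nat
  | [] => 0
  | l :: rest =>
    let s := PySem.Chars.strip l
    if !s.isEmpty && !PySem.Chars.startswith s ['#'] then 0 else pvBoundaryB rest + 1

-- 'l if l.strip() else ""'
def pvBlankB (l : List Char) : List Char := if (PySem.Chars.strip l).isEmpty then [] else l

-- 'while hdr and hdr[0] == "": hdr.pop(0)'  (and, on the reversed list, the trailing-pop loop)
def pvTrimFrontB : List (List Char) → List (List Char)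
  | [] => []
  | l :: rest => if l.isEmpty then pvTrimFrontB rest else l :: rest

def extract_header_stack_and_body_py_alt (content : String) : String × String :=
  let lines := PySem.Chars.splitOn content.toList ['\n']
  let boundary := pvBoundaryB lines
  let hdr0 := (lines.take boundary).map pvBlankB
  let hdr1 := pvTrimFrontB hdr0
  let hdr2 := (pvTrimFrontB hdr1.reverse).reverse
  let header_stack := PySem.Chars.join ['\n'] hdr2
  let body := PySem.Chars.strip (PySem.Chars.join ['\n'] (lines.drop boundary))
  (String.ofList header_stack, String.ofList body)

-- ===== PRECONDITION & SPEC =====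
def Spec_extract_header_stack_and_body_py (content : String) (out : String × String) : Prop := out = extract_header_stack_and_body_py_alt content
instance (content : String) (out : String × String) : Decidable (Spec_extract_header_stack_and_body_py content out) := by unfold Spec_extract_header_stack_and_body_py; infer_instance

-- ===== CLAIM (what is proved, stated in full; the proofs are below) =====
def Claim_equal_extract_header_stack_and_body_py : Prop := ∀ (content : String), Dom_extract_header_stack_and_body_py content → Spec_extract_header_stack_and_body_py content (extract_header_stack_and_body_py content)

-- ===== LEMMAS AND PROOFS =====

-- a line stays in the header section iff it is blank or starts (stripped) with '#'
def pvKeep (l : List Char) : Bool :=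
  (PySem.Chars.strip l).isEmpty || PySem.Chars.startswith (PySem.Chars.strip l) ['#']

def pvIsE (l : List Char) : Bool := (PySem.Chars.strip l).isEmpty

-- what A's loop does to header_lines over a keep-prefix
def pvAccUpd : List (List Char) → List (List Char) → List (List Char)
  | [], hdr => hdr
  | l :: r, hdr =>
    pvAccUpd r (if (PySem.Chars.strip l).isEmpty then (if !hdr.isEmpty then hdr ++ [[]] else hdr) else hdr ++ [l])

-- what A's loop does to body_start_idx over a keep-prefix
def pvBsiUpd : List (List Char) → Nat → Nat → Nat
  | [], _, b => b
  | l :: r, i, b => pvBsiUpd r (i + 1) (if (PySem.Chars.strip l).isEmpty then b else i + 1)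

theorem pvLoopA_keep (P : List (List Char)) (h : ∀ l ∈ P, pvKeep l = true) :
    ∀ (S : List (List Char)) (i : Nat) (hdr : List (List Char)) (b : Nat),
    pvLoopA (P ++ S) i hdr b true = pvLoopA S (i + P.length) (pvAccUpd P hdr) (pvBsiUpd P i b) true := by
  induction P with
  | nil => intro S i hdr b; simp [pvAccUpd, pvBsiUpd]
  | cons l r ih =>
    intro S i hdr b
    have hl := h l (by simp)
    have hr : ∀ x ∈ r, pvKeep x = true := fun x hx => h x (by simp [hx])
    by_cases he : (PySem.Chars.strip l).isEmpty = true
    · simp only [List.cons_append, pvLoopA, he, if_pos, Bool.true_and]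
      rw [ih hr]
      have harith : i + 1 + r.length = i + (r.length + 1) := by omega
      simp [pvAccUpd, pvBsiUpd, he, harith]
    · have hs : PySem.Chars.startswith (PySem.Chars.strip l) ['#'] = true := by
        simp [pvKeep, he] at hl; exact hl
      simp only [List.cons_append, pvLoopA, he, hs, Bool.and_true, if_false, if_true,
        Bool.false_eq_true, Bool.true_and]
      rw [ih hr]
      have harith : i + 1 + r.length = i + (r.length + 1) := by omega
      simp [pvAccUpd, pvBsiUpd, he, harith]

theorem pvLoopA_break (s : List Char) (S' : List (List Char)) (hk : pvKeep s = false)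
    (i : Nat) (hdr : List (List Char)) (b : Nat) :
    pvLoopA (s :: S') i hdr b true = (hdr, i) := by
  simp [pvKeep, Bool.or_eq_false_iff] at hk
  simp [pvLoopA, hk.1, hk.2]

theorem pvAccUpd_nonempty (P : List (List Char)) :
    ∀ hdr, hdr ≠ [] → pvAccUpd P hdr = hdr ++ P.map pvBlankB := by
  induction P with
  | nil => intro hdr _; simp [pvAccUpd]
  | cons l r ih =>
    intro hdr hne
    by_cases he : (PySem.Chars.strip l).isEmpty = true
    · simp only [pvAccUpd, he, if_pos]
      have : (!hdr.isEmpty) = true := by simp [hne]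
      rw [this]
      simp only [if_pos]
      rw [ih _ (by simp)]
      simp [pvBlankB, he]
    · rw [pvAccUpd, if_neg (by simp [he]), ih _ (by simp)]
      simp [pvBlankB, he]

theorem pvAccUpd_nil (P : List (List Char)) :
    pvAccUpd P [] = (P.dropWhile pvIsE).map pvBlankB := by
  induction P with
  | nil => simp [pvAccUpd]
  | cons l r ih =>
    by_cases he : (PySem.Chars.strip l).isEmpty = true
    · simp only [pvAccUpd, he, if_pos, List.isEmpty_nil, Bool.not_true, Bool.false_eq_true,
        if_neg, not_false_iff]
      rw [List.dropWhile_cons_of_pos (by simp [pvIsE, he])]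
      exact ih
    · simp only [pvAccUpd, he, Bool.false_eq_true, if_neg, not_false_iff, List.nil_append]
      rw [pvAccUpd_nonempty r [l] (by simp)]
      rw [List.dropWhile_cons_of_neg (by simp [pvIsE, he])]
      simp [pvBlankB, he]

theorem pvBoundaryB_eq (L : List (List Char)) :
    pvBoundaryB L = (L.takeWhile pvKeep).length := by
  induction L with
  | nil => simp [pvBoundaryB]
  | cons l r ih =>
    by_cases hk : pvKeep l = true
    · have : (!(PySem.Chars.strip l).isEmpty && !PySem.Chars.startswith (PySem.Chars.strip l) ['#']) = false := by
        simp [pvKeep] at hk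
        rcases hk with h | h <;> simp [h]
      rw [pvBoundaryB, List.takeWhile_cons_of_pos hk]
      simp only [this, Bool.false_eq_true, if_neg, not_false_iff, List.length_cons, ih]
    · have hk' : pvKeep l = false := by simpa using hk
      have : (!(PySem.Chars.strip l).isEmpty && !PySem.Chars.startswith (PySem.Chars.strip l) ['#']) = true := by
        simp [pvKeep, Bool.or_eq_false_iff] at hk'
        simp [hk'.1, hk'.2]
      rw [pvBoundaryB, List.takeWhile_cons_of_neg (by simp [hk'])]
      simp [this]

-- B's front trim on a blank-normalised list is A's dropWhile over the originals
theorem pvTrimFront_map_blank (P : List (List Char)) :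
    pvTrimFrontB (P.map pvBlankB) = (P.dropWhile pvIsE).map pvBlankB := by
  induction P with
  | nil => simp [pvTrimFrontB]
  | cons l r ih =>
    by_cases he : (PySem.Chars.strip l).isEmpty = true
    · rw [List.map_cons, pvTrimFrontB]
      simp only [pvBlankB, he, if_pos, List.isEmpty_nil, if_pos]
      rw [List.dropWhile_cons_of_pos (by simp [pvIsE, he])]
      exact ih
    · have hlne : l.isEmpty = false := by
        rcases l with _ | ⟨c, cs⟩
        · simp [PySem.Chars.strip, PySem.Chars.lstrip, PySem.Chars.rstrip] at he
        · simp
      rw [List.map_cons, pvTrimFrontB]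
      simp only [pvBlankB, he, Bool.false_eq_true, if_neg, not_false_iff, hlne]
      rw [List.dropWhile_cons_of_neg (by simp [pvIsE, he])]
      simp [pvBlankB, he]

-- the two trailing trims agree on lists whose members are blank-normalised
theorem pvDropEmptyRev_eq_trimFront (Y : List (List Char))
    (h : ∀ x ∈ Y, (PySem.Chars.strip x).isEmpty = x.isEmpty) :
    pvDropEmptyRevA Y = pvTrimFrontB Y := by
  induction Y with
  | nil => rfl
  | cons x r ih =>
    have hx := h x (by simp)
    rw [pvDropEmptyRevA, pvTrimFrontB, hx]
    by_cases hxe : x.isEmpty = true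
    · simp only [hxe, if_pos]
      exact ih (fun y hy => h y (by simp [hy]))
    · simp [hxe]

theorem pvBlank_strip_isEmpty (l : List Char) :
    (PySem.Chars.strip (pvBlankB l)).isEmpty = (pvBlankB l).isEmpty := by
  by_cases he : (PySem.Chars.strip l).isEmpty = true
  · have hb : pvBlankB l = [] := by simp [pvBlankB, he]
    rw [hb]
    rfl
  · have hlne : l.isEmpty = false := by
      rcases l with _ | ⟨c, cs⟩
      · simp [PySem.Chars.strip, PySem.Chars.lstrip, PySem.Chars.rstrip] at he
      · simp
    simp [pvBlankB, he, hlne]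

theorem pvBsiUpd_ge (P : List (List Char)) : ∀ i b, b ≤ i → b ≤ pvBsiUpd P i b := by
  induction P with
  | nil => intro i b _; simp [pvBsiUpd]
  | cons l r ih =>
    intro i b hbi
    rw [pvBsiUpd]
    by_cases he : (PySem.Chars.strip l).isEmpty = true
    · simpa [he] using ih (i + 1) b (by omega)
    · simp only [he, Bool.false_eq_true, if_neg, not_false_iff]
      have := ih (i + 1) (i + 1) (le_refl _)
      omega

theorem pvBsiUpd_tail_empty (P : List (List Char)) :
    ∀ i b, b ≤ i → ∀ x ∈ P.drop (pvBsiUpd P i b - i), (PySem.Chars.strip x).isEmpty = true := by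
  induction P with
  | nil => intro i b _ x hx; simp at hx
  | cons l r ih =>
    intro i b hbi x hx
    rw [pvBsiUpd] at hx
    by_cases he : (PySem.Chars.strip l).isEmpty = true
    · simp only [he, if_pos] at hx
      set u := pvBsiUpd r (i + 1) b with hu
      by_cases hui : u ≤ i
      · have : u - i = 0 := by omega
        rw [this, List.drop_zero] at hx
        rcases List.mem_cons.mp hx with rfl | hxr
        · exact he
        · have := ih (i + 1) b (by omega) x
          have h0 : u - (i + 1) = 0 := by omega
          rw [h0, List.drop_zero] at this
          exact this hxr
      · have : u - i = (u - (i + 1)) + 1 := by omega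
        rw [this, List.drop_succ_cons] at hx
        exact ih (i + 1) b (by omega) x hx
    · simp only [he, Bool.false_eq_true, if_neg, not_false_iff] at hx
      set u := pvBsiUpd r (i + 1) (i + 1) with hu
      have hge : i + 1 ≤ u := pvBsiUpd_ge r (i + 1) (i + 1) (le_refl _)
      have : u - i = (u - (i + 1)) + 1 := by omega
      rw [this, List.drop_succ_cons] at hx
      exact ih (i + 1) (i + 1) (le_refl _) x hx

-- strip is [] exactly on all-whitespace strings
theorem pvStrip_nil_imp_space (l : List Char) (h : PySem.Chars.strip l = []) :
    ∀ c ∈ l, PySem.Chars.isspace c = true := by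
  induction l with
  | nil => intro c hc; simp at hc
  | cons c cs ih =>
    intro d hd
    by_cases hc : PySem.Chars.isspace c = true
    · have hstep : PySem.Chars.strip (c :: cs) = PySem.Chars.strip cs := by
        simp [PySem.Chars.strip, PySem.Chars.lstrip, List.dropWhile_cons_of_pos hc]
      rcases List.mem_cons.mp hd with rfl | hdc
      · exact hc
      · exact ih (hstep ▸ h) d hdc
    · exfalso
      have h1 : PySem.Chars.lstrip (c :: cs) = c :: cs := by
        simp [PySem.Chars.lstrip, List.dropWhile_cons_of_neg hc]
      have h2 : PySem.Chars.strip (c :: cs) = PySem.Chars.rstrip (c :: cs) := by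
        simp [PySem.Chars.strip, h1]
      rw [h2] at h
      have h3 : List.dropWhile PySem.Chars.isspace (cs.reverse ++ [c]) = [] := by
        have := congrArg List.reverse h
        simpa [PySem.Chars.rstrip] using this
      rw [List.dropWhile_eq_nil_iff] at h3
      exact hc (h3 c (by simp))

theorem pvSpace_strip_nil (l : List Char) (h : ∀ c ∈ l, PySem.Chars.isspace c = true) :
    PySem.Chars.strip l = [] := by
  have h1 : PySem.Chars.lstrip l = [] := by
    simp [PySem.Chars.lstrip, List.dropWhile_eq_nil_iff]
    exact h
  simp [PySem.Chars.strip, h1, PySem.Chars.rstrip]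

theorem pvJoin_space (X : List (List Char)) (h : ∀ x ∈ X, (PySem.Chars.strip x).isEmpty = true) :
    ∀ c ∈ PySem.Chars.join ['\n'] X, PySem.Chars.isspace c = true := by
  induction X with
  | nil => intro c hc; simp [PySem.Chars.join, List.intercalate] at hc
  | cons x r ih =>
    intro c hc
    rcases r with _ | ⟨y, r'⟩
    · simp [PySem.Chars.join, List.intercalate] at hc
      exact pvStrip_nil_imp_space x (by simpa [List.isEmpty_iff] using h x (by simp)) c hc
    · have hco : PySem.Chars.join ['\n'] (x :: y :: r') = x ++ '\n' :: PySem.Chars.join ['\n'] (y :: r') := by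
        simp [PySem.Chars.join, List.intercalate, List.intersperse]
      rw [hco] at hc
      rcases List.mem_append.mp hc with hcx | hcr
      · exact pvStrip_nil_imp_space x (by simpa [List.isEmpty_iff] using h x (by simp)) c hcx
      · rcases List.mem_cons.mp hcr with rfl | hcr'
        · decide
        · exact ih (fun z hz => h z (by simp [hz])) c hcr'

theorem pvStrip_join_empty (X : List (List Char)) (h : ∀ x ∈ X, (PySem.Chars.strip x).isEmpty = true) :
    PySem.Chars.strip (PySem.Chars.join ['\n'] X) = [] :=
  pvSpace_strip_nil _ (pvJoin_space X h)

-- head of the kept suffix breaks out of the header section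
theorem pvDropWhile_keep (L : List (List Char)) :
    L.dropWhile pvKeep = [] ∨
      ∃ s S', L.dropWhile pvKeep = s :: S' ∧ pvKeep s = false := by
  rcases hS : L.dropWhile pvKeep with _ | ⟨s, S'⟩
  · exact Or.inl rfl
  · refine Or.inr ⟨s, S', rfl, ?_⟩
    have := List.head_dropWhile_not pvKeep (l := L) (by simp [hS])
    simpa [hS] using this

-- the whole pipeline, stated over an arbitrary line list
theorem pvMain (L : List (List Char)) :
    (let r := pvLoopA L 0 [] 0 true
     let hdr2 := (pvDropEmptyRevA r.1.reverse).reverse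
     ((if hdr2.isEmpty then [] else PySem.Chars.join ['\n'] hdr2),
      PySem.Chars.strip (PySem.Chars.join ['\n'] (PySem.List.slice L (some (r.2 : Int)) none)))) =
    (let boundary := pvBoundaryB L
     let hdr2 := (pvTrimFrontB (pvTrimFrontB ((L.take boundary).map pvBlankB)).reverse).reverse
     (PySem.Chars.join ['\n'] hdr2,
      PySem.Chars.strip (PySem.Chars.join ['\n'] (L.drop boundary)))) := by
  have hPS : L.takeWhile pvKeep ++ L.dropWhile pvKeep = L := List.takeWhile_append_dropWhile
  have hkeepP : ∀ l ∈ L.takeWhile pvKeep, pvKeep l = true := fun l hl => List.mem_takeWhile_imp hl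
  have hbnd : pvBoundaryB L = (L.takeWhile pvKeep).length := pvBoundaryB_eq L
  have htake : L.take (pvBoundaryB L) = L.takeWhile pvKeep := by
    have h := List.take_left' (l₁ := L.takeWhile pvKeep) (l₂ := L.dropWhile pvKeep)
      (i := (L.takeWhile pvKeep).length) rfl
    rw [hPS] at h
    rw [hbnd]
    exact h
  have hdrop : L.drop (pvBoundaryB L) = L.dropWhile pvKeep := by
    have h := List.drop_left' (l₁ := L.takeWhile pvKeep) (l₂ := L.dropWhile pvKeep)
      (i := (L.takeWhile pvKeep).length) rfl
    rw [hPS] at h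
    rw [hbnd]
    exact h
  -- common header list
  have hA1 : (pvLoopA L 0 [] 0 true).1 = ((L.takeWhile pvKeep).dropWhile pvIsE).map pvBlankB := by
    rcases pvDropWhile_keep L with hnil | ⟨s, S', hcons, hks⟩
    · conv_lhs => rw [← hPS, hnil]
      rw [pvLoopA_keep _ hkeepP [] 0 [] 0]
      simp [pvLoopA, pvAccUpd_nil]
    · conv_lhs => rw [← hPS, hcons]
      rw [pvLoopA_keep _ hkeepP (s :: S') 0 [] 0, pvLoopA_break s S' hks]
      simp [pvAccUpd_nil]
  have hB1 : pvTrimFrontB ((L.take (pvBoundaryB L)).map pvBlankB) = ((L.takeWhile pvKeep).dropWhile pvIsE).map pvBlankB := by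
    rw [htake, pvTrimFront_map_blank]
  have hhdr : (pvDropEmptyRevA (pvLoopA L 0 [] 0 true).1.reverse).reverse =
      (pvTrimFrontB (pvTrimFrontB ((L.take (pvBoundaryB L)).map pvBlankB)).reverse).reverse := by
    rw [hA1, hB1]
    congr 1
    apply pvDropEmptyRev_eq_trimFront
    intro x hx
    rw [List.mem_reverse] at hx
    rcases List.mem_map.mp hx with ⟨l, _, rfl⟩
    exact pvBlank_strip_isEmpty l
  -- join of [] is [], so A's guard is redundant
  have hguard : ∀ (h2 : List (List Char)),
      (if h2.isEmpty then ([] : List Char) else PySem.Chars.join ['\n'] h2) = PySem.Chars.join ['\n'] h2 := by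
    intro h2
    rcases h2 with _ | _
    · simp [PySem.Chars.join, List.intercalate]
    · simp
  -- bodies
  have hbody : PySem.Chars.strip (PySem.Chars.join ['\n'] (PySem.List.slice L (some ((pvLoopA L 0 [] 0 true).2 : Int)) none)) =
      PySem.Chars.strip (PySem.Chars.join ['\n'] (L.drop (pvBoundaryB L))) := by
    rw [PySem.List.slice_from_natCast]
    rcases pvDropWhile_keep L with hnil | ⟨s, S', hcons, hks⟩
    · -- loop ran to the end: everything from bsi on is blank, both sides strip to []
      have hLP : L = L.takeWhile pvKeep := by
        conv_lhs => rw [← hPS, hnil]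
        rw [List.append_nil]
      have hA2 : (pvLoopA L 0 [] 0 true).2 = pvBsiUpd (L.takeWhile pvKeep) 0 0 := by
        conv_lhs => rw [← hPS, hnil]
        rw [pvLoopA_keep _ hkeepP [] 0 [] 0]
        simp [pvLoopA]
      have hleft : PySem.Chars.strip (PySem.Chars.join ['\n'] (L.drop (pvLoopA L 0 [] 0 true).2)) = [] := by
        apply pvStrip_join_empty
        intro x hx
        rw [hA2] at hx
        conv at hx => rw [hLP]
        rw [List.takeWhile_idem] at hx
        exact pvBsiUpd_tail_empty (L.takeWhile pvKeep) 0 0 (le_refl _) x (by simpa using hx)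
      have hright : PySem.Chars.strip (PySem.Chars.join ['\n'] (L.drop (pvBoundaryB L))) = [] := by
        rw [hdrop, hnil]
        rfl
      rw [hleft, hright]
    · -- loop broke at the boundary: both indices agree
      have hA2 : (pvLoopA L 0 [] 0 true).2 = pvBoundaryB L := by
        conv_lhs => rw [← hPS, hcons]
        rw [pvLoopA_keep _ hkeepP (s :: S') 0 [] 0, pvLoopA_break s S' hks]
        simp [hbnd]
      rw [hA2]
  simp only []
  rw [hhdr, hguard, hbody]

-- ===== VERDICT (by name: the statement is the Claim_ definition above) =====
set_option maxHeartbeats 1000000 in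
theorem extract_header_stack_and_body_py_spec : Claim_equal_extract_header_stack_and_body_py := by
  intro content _
  unfold Spec_extract_header_stack_and_body_py extract_header_stack_and_body_py extract_header_stack_and_body_py_alt
  have h := pvMain (PySem.Chars.splitOn content.toList ['\n'])
  exact Prod.ext (congrArg String.ofList (congrArg Prod.fst h))
    (congrArg String.ofList (congrArg Prod.snd h))
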